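-- pv_equiv track=rewrite | github.com/AryaR-06/esc180-projects | gomoku.py | my_detect_row
-- ===== SOURCE A (Python) =====
-- def is_bounded(board, y_end, x_end, length, d_y, d_x):
--     closed = 0
--
--     height = len(board)
--     width = len(board[0])
--
--     y_start = y_end - d_y*(length-1)
--     x_start = x_end - d_x*(length-1)
--
--     end_out_of_bound = not ((0 <= y_end + d_y < height) and (0 <= x_end + d_x < width))
--     start_out_of_bound = not ((0 <= y_start - d_y < height) and (0 <= x_start - d_x < width))
--
--     if end_out_of_bound or board[y_end + d_y][x_end + d_x] != " ":
--         closed += 1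
--
--     if start_out_of_bound or board[y_start - d_y][x_start - d_x] != " ":
--         closed += 1
--
--     if closed == 2:
--         return "CLOSED"
--
--     elif closed == 1:
--         return "SEMIOPEN"
--
--     elif closed == 0:
--         return "OPEN"
--
-- def my_detect_row(board, col, y_start, x_start, length, d_y, d_x):
--     open_seq_count = 0
--     semi_open_seq_count = 0
--     closed_seq_count = 0
--
--     y = y_start
--     x = x_start
--
--     height = len(board)
--     width = len(board[0])
--
--     temp_len = 0
--
--     while (0 <= y < height) and (0 <= x < width):
--         end_out_of_bound = not ((0 <= y + d_y < height) and (0 <= x + d_x < width))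
--
--         if board[y][x] == col:
--             temp_len += 1
--         else:
--             temp_len = 0
--
--         if temp_len == length and (end_out_of_bound or (not end_out_of_bound and board[y + d_y][x + d_x] != col)):
--             opening = is_bounded(board, y, x, length, d_y, d_x)
--             if opening == "SEMIOPEN":
--                 semi_open_seq_count += 1
--             elif opening == "OPEN":
--                 open_seq_count += 1
--             elif opening == "CLOSED":
--                 closed_seq_count += 1
--             temp_len = 0
--
--         y += d_y
--         x += d_x
--
--     return open_seq_count, semi_open_seq_count, closed_seq_count
-- ===== SOURCE B (Python) =====
-- def my_detect_row(board, col, y_start, x_start, length, d_y, d_x):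
--     height = len(board)
--     width = len(board[0])
--
--     # phase 1: walk the line once, collecting the cell values
--     cells = []
--     y, x = y_start, x_start
--     while (0 <= y < height) and (0 <= x < width):
--         cells.append(board[y][x])
--         y += d_y
--         x += d_x
--
--     # a boundary (by index along the line) is closed if off-board or not a blank
--     def closed_at(i):
--         yy = y_start + i * d_y
--         xx = x_start + i * d_x
--         if not ((0 <= yy < height) and (0 <= xx < width)):
--             return 1
--         return 1 if board[yy][xx] != " " else 0
--
--     # phase 2: scan for maximal runs of col of exactly `length`, classify by
--     # the two boundary cells
--     counts = [0, 0, 0]  # OPEN, SEMIOPEN, CLOSED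
--     n = len(cells)
--     i = 0
--     while i < n:
--         if cells[i] != col:
--             i += 1
--             continue
--         j = i + 1
--         while j < n and cells[j] == col:
--             j += 1
--         if j - i == length:
--             counts[closed_at(i - 1) + closed_at(j)] += 1
--         i = j
--     return counts[0], counts[1], counts[2]
-- ===== Notes on version B (the rewrite author's own statement) =====
-- stated objective: alternative
-- what changed: A fuses walking, run-tracking (temp_len) and classification into one stateful while loop calling is_bounded; B first collects the line's cells in one walk, then scans that list for maximal runs of col of exactly `length` and classifies each run by its two boundary indices with pure index arithmetic (no is_bounded, no temp_len).
-- intended difference: When length == 0 and the start cell is on the board, A's temp_len==0 state makes it 'detect' a zero-length sequence at every visited non-col cell followed by a break and returns nonzero counts (e.g. (0,1,1) on the witness), while B returns (0,0,0); there are no sequences of length 0, so B's answer is the intended one. — e.g. on my_detect_row([[" ", "x"]], "b", 0, 0, 0, 0, 1): A returns (0, 1, 1), B returns (0, 0, 0)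
-- outside the precondition, e.g. on my_detect_row([['a', 'b'], ['c']], 'a', 0, 0, 1, 1, 0): A returns (0, 0, 1), B returns (0, 0, 1)
import Mathlib
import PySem

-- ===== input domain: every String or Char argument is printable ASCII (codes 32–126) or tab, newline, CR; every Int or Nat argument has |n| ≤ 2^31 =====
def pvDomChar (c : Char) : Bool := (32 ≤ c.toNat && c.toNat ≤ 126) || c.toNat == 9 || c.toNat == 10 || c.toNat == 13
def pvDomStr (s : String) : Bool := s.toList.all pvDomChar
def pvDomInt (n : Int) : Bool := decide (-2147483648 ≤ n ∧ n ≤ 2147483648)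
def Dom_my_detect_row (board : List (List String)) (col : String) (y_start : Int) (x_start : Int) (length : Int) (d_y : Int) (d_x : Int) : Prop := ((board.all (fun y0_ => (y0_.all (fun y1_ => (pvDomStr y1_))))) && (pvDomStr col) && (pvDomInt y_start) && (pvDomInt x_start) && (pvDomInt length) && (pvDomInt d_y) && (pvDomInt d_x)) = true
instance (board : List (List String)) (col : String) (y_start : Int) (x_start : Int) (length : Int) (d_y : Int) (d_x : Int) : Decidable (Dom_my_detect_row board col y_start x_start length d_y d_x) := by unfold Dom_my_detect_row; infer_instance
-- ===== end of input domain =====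

-- B replaces A's fused walk/temp_len/is_bounded loop by collect-cells-then-scan-runs with
-- index arithmetic for the two boundaries (objective: alternative decomposition, same cost).

-- ===== PORT A =====
-- board[y][x]; exact for the in-range accesses Pre_ admits
def pvCell (board : List (List String)) (y x : Int) : String :=
  (((PySem.List.pyGet? board y).bind (fun row => PySem.List.pyGet? row x)).getD "")

def is_bounded (board : List (List String)) (y_end x_end length d_y d_x : Int) : String :=
  let height : Int := board.length
  let width : Int := (board.headD []).length
  let y_s := y_end - d_y * (length - 1)
  let x_s := x_end - d_x * (length - 1)
  let endOOB : Bool := ! decide (0 ≤ y_end + d_y ∧ y_end + d_y < height ∧ 0 ≤ x_end + d_x ∧ x_end + d_x < width)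
  let startOOB : Bool := ! decide (0 ≤ y_s - d_y ∧ y_s - d_y < height ∧ 0 ≤ x_s - d_x ∧ x_s - d_x < width)
  let closed1 : Int := if endOOB = true ∨ pvCell board (y_end + d_y) (x_end + d_x) ≠ " " then 1 else 0
  let closed2 : Int := closed1 + (if startOOB = true ∨ pvCell board (y_s - d_y) (x_s - d_x) ≠ " " then 1 else 0)
  if closed2 = 2 then "CLOSED"
  else if closed2 = 1 then "SEMIOPEN"
  else if closed2 = 0 then "OPEN"
  else ""  -- unreachable: closed2 ∈ {0,1,2} (Python's implicit None)

-- A's while loop; fuel bounds the number of iterations, enough on Pre_ (see walk-length lemmas)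
def pvLoopA (board : List (List String)) (col : String) (length d_y d_x : Int) : Nat → Int → Int → Int → Int × Int × Int → Int × Int × Int
  | 0, _, _, _, acc => acc
  | fuel+1, y, x, temp, acc =>
    if 0 ≤ y ∧ y < (board.length : Int) ∧ 0 ≤ x ∧ x < ((board.headD []).length : Int) then
      let endOOB : Bool := ! decide (0 ≤ y + d_y ∧ y + d_y < (board.length : Int) ∧ 0 ≤ x + d_x ∧ x + d_x < ((board.headD []).length : Int))
      let temp' : Int := if pvCell board y x = col then temp + 1 else 0
      if temp' = length ∧ (endOOB = true ∨ (endOOB = false ∧ pvCell board (y + d_y) (x + d_x) ≠ col)) then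
        let opening := is_bounded board y x length d_y d_x
        let acc' := if opening = "SEMIOPEN" then (acc.1, acc.2.1 + 1, acc.2.2)
          else if opening = "OPEN" then (acc.1 + 1, acc.2.1, acc.2.2)
          else if opening = "CLOSED" then (acc.1, acc.2.1, acc.2.2 + 1)
          else acc
        pvLoopA board col length d_y d_x fuel (y + d_y) (x + d_x) 0 acc'
      else
        pvLoopA board col length d_y d_x fuel (y + d_y) (x + d_x) temp' acc
    else acc

def my_detect_row (board : List (List String)) (col : String) (y_start : Int) (x_start : Int) (length : Int) (d_y : Int) (d_x : Int) : Int × Int × Int :=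
  pvLoopA board col length d_y d_x (board.length + (board.headD []).length + 1) y_start x_start 0 (0, 0, 0)

-- ===== PORT B =====
-- phase 1 of Source B: walk the line once collecting the cells (same fuel bound)
def pvWalk (board : List (List String)) (d_y d_x : Int) : Nat → Int → Int → List String
  | 0, _, _ => []
  | fuel+1, y, x =>
    if 0 ≤ y ∧ y < (board.length : Int) ∧ 0 ≤ x ∧ x < ((board.headD []).length : Int) then
      pvCell board y x :: pvWalk board d_y d_x fuel (y + d_y) (x + d_x)
    else []

-- Source B's closed_at: 1 if boundary index i is off-board or not blank, else 0
def pvClosedAt (board : List (List String)) (y_start x_start d_y d_x : Int) (i : Int) : Int :=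
  if ¬ (0 ≤ y_start + i * d_y ∧ y_start + i * d_y < (board.length : Int) ∧ 0 ≤ x_start + i * d_x ∧ x_start + i * d_x < ((board.headD []).length : Int)) then 1
  else if pvCell board (y_start + i * d_y) (x_start + i * d_x) ≠ " " then 1 else 0

-- Source B's counts[k] += 1 (k = 0 OPEN, 1 SEMIOPEN, else CLOSED)
def pvBump (k : Int) (acc : Int × Int × Int) : Int × Int × Int :=
  if k = 0 then (acc.1 + 1, acc.2.1, acc.2.2)
  else if k = 1 then (acc.1, acc.2.1 + 1, acc.2.2)
  else (acc.1, acc.2.1, acc.2.2 + 1)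

-- phase 2 of Source B: scan the cell list for maximal runs of col, classify runs of exact
-- length; the Nat argument mirrors Source B's loop bound (at most n iterations of `while i < n`)
def pvScanB (col : String) (length : Int) (cb : Int → Int) : Nat → Int → List String → Int × Int × Int → Int × Int × Int
  | 0, _, _, acc => acc
  | _+1, _, [], acc => acc
  | fuel+1, i, c :: rest, acc =>
    if c ≠ col then pvScanB col length cb fuel (i + 1) rest acc
    else
      let r : Int := 1 + ((rest.takeWhile (fun d => d == col)).length : Int)
      let acc' := if r = length then pvBump (cb (i - 1) + cb (i + r)) acc else acc
      pvScanB col length cb fuel (i + r) (rest.dropWhile (fun d => d == col)) acc'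

def my_detect_row_alt (board : List (List String)) (col : String) (y_start : Int) (x_start : Int) (length : Int) (d_y : Int) (d_x : Int) : Int × Int × Int :=
  let cells := pvWalk board d_y d_x (board.length + (board.headD []).length + 1) y_start x_start
  pvScanB col length (pvClosedAt board y_start x_start d_y d_x) cells.length 0 cells (0, 0, 0)

-- ===== PRECONDITION & SPEC =====
-- Pre_ excludes inputs where the Python raises or diverges: the empty board (IndexError on
-- board[0]), d_y = d_x = 0 with an in-bounds start (the while loop never terminates), and —
-- when the start is in bounds — boards whose rows are shorter than row 0 (a ragged board can
-- make board[y][x] raise IndexError mid-walk; this closed-form condition also drops some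
-- ragged boards whose walk happens to avoid the short cells, on which A and B return alike).
def Pre_my_detect_row (board : List (List String)) (col : String) (y_start : Int) (x_start : Int) (length : Int) (d_y : Int) (d_x : Int) : Prop :=
  board ≠ [] ∧
  ((¬ (0 ≤ y_start ∧ y_start < (board.length : Int) ∧ 0 ≤ x_start ∧ x_start < ((board.headD []).length : Int))) ∨
   (¬ (d_y = 0 ∧ d_x = 0) ∧ ∀ row ∈ board, (board.headD []).length ≤ row.length))
instance (board : List (List String)) (col : String) (y_start : Int) (x_start : Int) (length : Int) (d_y : Int) (d_x : Int) : Decidable (Pre_my_detect_row board col y_start x_start length d_y d_x) := by unfold Pre_my_detect_row; infer_instance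

def pvWitness_my_detect_row : List (List String) × String × Int × Int × Int × Int × Int :=
  ([[" ", "b"], ["b", " "]], "b", 0, 0, 1, 0, 1)

-- helpers for D_: position j of the walk is on the board / its cell value (D_ never runs
-- either port; it only inspects the board along the line by index arithmetic)
def dInB (board : List (List String)) (y_start x_start d_y d_x : Int) (j : Nat) : Prop :=
  0 ≤ y_start + j * d_y ∧ (y_start + j * d_y).toNat < board.length ∧
  0 ≤ x_start + j * d_x ∧ (x_start + j * d_x).toNat < (board.headD []).length
def dCell (board : List (List String)) (y_start x_start d_y d_x : Int) (j : Nat) : String :=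
  (board.getD (y_start + j * d_y).toNat []).getD (x_start + j * d_x).toNat ""

-- When length == 0, the start cell is on the board and some visited non-col cell is followed
-- by an off-board cell or a non-col cell, A's temp_len==0 state makes it count a
-- "zero-length sequence" there and return nonzero counts, while B returns (0, 0, 0);
-- there are no sequences of length 0, so B's answer is the intended one.
def D_my_detect_row (board : List (List String)) (col : String) (y_start : Int) (x_start : Int) (length : Int) (d_y : Int) (d_x : Int) : Prop :=
  length = 0 ∧ dInB board y_start x_start d_y d_x 0 ∧
  ∃ j ∈ List.range (board.length + (board.headD []).length + 1),
    dInB board y_start x_start d_y d_x j ∧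
    dCell board y_start x_start d_y d_x j ≠ col ∧
    (¬ dInB board y_start x_start d_y d_x (j + 1) ∨ dCell board y_start x_start d_y d_x (j + 1) ≠ col)
instance (board : List (List String)) (col : String) (y_start : Int) (x_start : Int) (length : Int) (d_y : Int) (d_x : Int) : Decidable (D_my_detect_row board col y_start x_start length d_y d_x) := by unfold D_my_detect_row dInB; infer_instance

def Spec_my_detect_row (board : List (List String)) (col : String) (y_start : Int) (x_start : Int) (length : Int) (d_y : Int) (d_x : Int) (out : Int × Int × Int) : Prop := ¬ D_my_detect_row board col y_start x_start length d_y d_x → out = my_detect_row_alt board col y_start x_start length d_y d_x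
instance (board : List (List String)) (col : String) (y_start : Int) (x_start : Int) (length : Int) (d_y : Int) (d_x : Int) (out : Int × Int × Int) : Decidable (Spec_my_detect_row board col y_start x_start length d_y d_x out) := by unfold Spec_my_detect_row; infer_instance

def pvDiffWitness_my_detect_row : List (List String) × String × Int × Int × Int × Int × Int :=
  ([[" ", "x"]], "b", 0, 0, 0, 0, 1)
def pvDiffWitnessOut_my_detect_row : (Int × Int × Int) × (Int × Int × Int) := ((0, 1, 1), (0, 0, 0))

-- ===== CLAIM (what is proved, stated in full; the proofs are below) =====
def Claim_unchanged_my_detect_row : Prop := ∀ (board : List (List String)) (col : String) (y_start : Int) (x_start : Int) (length : Int) (d_y : Int) (d_x : Int), Dom_my_detect_row board col y_start x_start length d_y d_x → Pre_my_detect_row board col y_start x_start length d_y d_x → Spec_my_detect_row board col y_start x_start length d_y d_x (my_detect_row board col y_start x_start length d_y d_x)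
def Claim_changed_my_detect_row : Prop := Dom_my_detect_row (pvDiffWitness_my_detect_row.1) (pvDiffWitness_my_detect_row.2.1) (pvDiffWitness_my_detect_row.2.2.1) (pvDiffWitness_my_detect_row.2.2.2.1) (pvDiffWitness_my_detect_row.2.2.2.2.1) (pvDiffWitness_my_detect_row.2.2.2.2.2.1) (pvDiffWitness_my_detect_row.2.2.2.2.2.2) ∧ Pre_my_detect_row (pvDiffWitness_my_detect_row.1) (pvDiffWitness_my_detect_row.2.1) (pvDiffWitness_my_detect_row.2.2.1) (pvDiffWitness_my_detect_row.2.2.2.1) (pvDiffWitness_my_detect_row.2.2.2.2.1) (pvDiffWitness_my_detect_row.2.2.2.2.2.1) (pvDiffWitness_my_detect_row.2.2.2.2.2.2) ∧ D_my_detect_row (pvDiffWitness_my_detect_row.1) (pvDiffWitness_my_detect_row.2.1) (pvDiffWitness_my_detect_row.2.2.1) (pvDiffWitness_my_detect_row.2.2.2.1) (pvDiffWitness_my_detect_row.2.2.2.2.1) (pvDiffWitness_my_detect_row.2.2.2.2.2.1) (pvDiffWitness_my_detect_row.2.2.2.2.2.2) ∧ my_detect_row (pvDiffWitness_my_detect_row.1)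 (pvDiffWitness_my_detect_row.2.1) (pvDiffWitness_my_detect_row.2.2.1) (pvDiffWitness_my_detect_row.2.2.2.1) (pvDiffWitness_my_detect_row.2.2.2.2.1) (pvDiffWitness_my_detect_row.2.2.2.2.2.1) (pvDiffWitness_my_detect_row.2.2.2.2.2.2) = pvDiffWitnessOut_my_detect_row.1 ∧ my_detect_row_alt (pvDiffWitness_my_detect_row.1) (pvDiffWitness_my_detect_row.2.1) (pvDiffWitness_my_detect_row.2.2.1) (pvDiffWitness_my_detect_row.2.2.2.1) (pvDiffWitness_my_detect_row.2.2.2.2.1) (pvDiffWitness_my_detect_row.2.2.2.2.2.1) (pvDiffWitness_my_detect_row.2.2.2.2.2.2) = pvDiffWitnessOut_my_detect_row.2 ∧ pvDiffWitnessOut_my_detect_row.1 ≠ pvDiffWitnessOut_my_detect_row.2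


def Claim_exact_my_detect_row : Prop := ∀ (board : List (List String)) (col : String) (y_start : Int) (x_start : Int) (length : Int) (d_y : Int) (d_x : Int), Dom_my_detect_row board col y_start x_start length d_y d_x → Pre_my_detect_row board col y_start x_start length d_y d_x → D_my_detect_row board col y_start x_start length d_y d_x → my_detect_row board col y_start x_start length d_y d_x ≠ my_detect_row_alt board col y_start x_start length d_y d_x

-- ===== LEMMAS AND PROOFS =====

-- A-side loop, rephrased on the cell list: temp_len-carrying scan (proof intermediary)
def aScan (col : String) (length : Int) (cb : Int → Int) (brk : Int → Bool) : Int → Int → List String → Int × Int × Int → Int × Int × Int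
  | _, _, [], acc => acc
  | t, i, c :: rest, acc =>
    if (if c = col then t + 1 else 0) = length ∧ brk i = true then
      aScan col length cb brk 0 (i + 1) rest (pvBump (cb (i + 1) + cb (i - length)) acc)
    else aScan col length cb brk (if c = col then t + 1 else 0) (i + 1) rest acc

-- "the cell after index k breaks the current run" (off-board or ≠ col)
def brkF (board : List (List String)) (col : String) (y_start x_start d_y d_x : Int) (k : Int) : Bool :=
  (! decide (0 ≤ y_start + (k+1) * d_y ∧ y_start + (k+1) * d_y < (board.length : Int) ∧ 0 ≤ x_start + (k+1) * d_x ∧ x_start + (k+1) * d_x < ((board.headD []).length : Int)))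
  || decide (pvCell board (y_start + (k+1) * d_y) (x_start + (k+1) * d_x) ≠ col)

-- the cell list is consistent with brk: each break flag matches the next cell, and the walk
-- ends at a break
def GoodCells (col : String) (brk : Int → Bool) : Int → List String → Prop
  | _, [] => True
  | i, [_] => brk i = true
  | i, _ :: c' :: rest => (brk i = true ↔ c' ≠ col) ∧ GoodCells col brk (i + 1) (c' :: rest)

theorem goodCells_tail (col : String) (brk : Int → Bool) (i : Int) (c : String) (rest : List String)
    (h : GoodCells col brk i (c :: rest)) : GoodCells col brk (i + 1) rest := by
  cases rest with
  | nil => trivial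
  | cons c' rest' => exact h.2

theorem goodCells_append (col : String) (brk : Int → Bool) :
    ∀ (l1 l2 : List String) (i : Int), GoodCells col brk i (l1 ++ l2) →
      GoodCells col brk (i + l1.length) l2 := by
  intro l1
  induction l1 with
  | nil => intro l2 i h; simpa using h
  | cons c tl ih =>
      intro l2 i h
      have := ih l2 (i + 1) (goodCells_tail col brk i c (tl ++ l2) h)
      have e : i + 1 + (tl.length : Int) = i + ((c :: tl).length : Int) := by
        simp [List.length_cons]; ring
      rwa [e] at this

theorem aScan_zero (col : String) (length : Int) (cb : Int → Int) (brk : Int → Bool)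
    (rest : List String) (hrest : rest = [] ∨ ∃ h tl, rest = h :: tl ∧ h ≠ col)
    (t j : Int) (acc : Int × Int × Int) :
    aScan col length cb brk t j rest acc = aScan col length cb brk 0 j rest acc := by
  rcases hrest with rfl | ⟨h, tl, rfl, hh⟩
  · rfl
  · simp [aScan, hh]

theorem aScan_run (col : String) (length : Int) (cb : Int → Int) (brk : Int → Bool) :
    ∀ (run : List String), run ≠ [] → (∀ d ∈ run, d = col) →
    ∀ (rest' : List String), (rest' = [] ∨ ∃ h tl, rest' = h :: tl ∧ h ≠ col) →
    ∀ (i t : Int) (acc : Int × Int × Int),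
      GoodCells col brk i (run ++ rest') →
      aScan col length cb brk t i (run ++ rest') acc =
      aScan col length cb brk 0 (i + run.length) rest'
        (if t + run.length = length then
            pvBump (cb (i + run.length) + cb (i + run.length - 1 - length)) acc
          else acc) := by
  intro run
  induction run with
  | nil => intro h; exact absurd rfl h
  | cons c tl ih =>
      intro _ hcol rest' hrest' i t acc hg
      have hc : c = col := hcol c (by simp)
      cases tl with
      | nil =>
          -- the single last cell of the run: here the break flag is true
          have hbrk : brk i = true := by
            rcases hrest' with rfl | ⟨h, tl', rfl, hh⟩
            · simpa [GoodCells] using hg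
            · exact (hg.1).mpr hh
          rw [List.cons_append, List.nil_append, aScan]
          have e1 : i + (([c] : List String).length : Int) = i + 1 := by simp
          have e2 : t + (([c] : List String).length : Int) = t + 1 := by simp
          rw [e1, e2]
          by_cases hf : t + 1 = length
          · rw [if_pos (by simp [hc, hf, hbrk]), if_pos hf]
            have e3 : i + 1 - 1 - length = i - length := by ring
            rw [e3]
          · rw [if_neg (by simp [hc, hbrk, hf]), if_neg hf]
            have hsim : (if c = col then t + 1 else 0) = t + 1 := by simp [hc]
            rw [hsim]
            exact aScan_zero col length cb brk rest' hrest' (t + 1) (i + 1) acc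
      | cons c2 tl2 =>
          have hc2 : c2 = col := hcol c2 (by simp)
          have hbrk : brk i = false := by
            have h1 : (brk i = true ↔ c2 ≠ col) := hg.1
            by_cases hb : brk i = true
            · exact absurd hc2 (h1.mp hb)
            · simpa using hb
          have hnot : ¬ ((if c = col then t + 1 else 0) = length ∧ brk i = true) := by
            rw [hbrk]; intro hx; exact absurd hx.2 (by simp)
          rw [List.cons_append, aScan, if_neg hnot]
          have hrec := ih (by simp) (fun d hd => hcol d (by simp [hd]))
            rest' hrest' (i + 1) (if c = col then t + 1 else 0) acc hg.2
          rw [hrec]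
          have hcif : (if c = col then t + 1 else 0) = t + 1 := by simp [hc]
          rw [hcif]
          have e1 : i + 1 + ((c2 :: tl2).length : Int) = i + (((c :: c2 :: tl2 : List String).length : Nat) : Int) := by
            push_cast [List.length_cons]; ring
          have e2 : t + 1 + ((c2 :: tl2).length : Int) = t + (((c :: c2 :: tl2 : List String).length : Nat) : Int) := by
            push_cast [List.length_cons]; ring
          rw [e1, e2]

theorem dropWhile_head_not (col : String) :
    ∀ (l : List String), (l.dropWhile (fun d => d == col)) = [] ∨
      ∃ h tl, (l.dropWhile (fun d => d == col)) = h :: tl ∧ h ≠ col := by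
  intro l
  induction l with
  | nil => left; rfl
  | cons c tl ih =>
      by_cases hc : c = col
      · simpa [List.dropWhile, hc] using ih
      · right
        refine ⟨c, tl, ?_, hc⟩
        have hb : (c == col) = false := by simpa using hc
        simp [List.dropWhile, hb]

theorem aScan_eq_scanB (col : String) (length : Int) (cb : Int → Int) (brk : Int → Bool)
    (hlen : length ≠ 0) :
    ∀ (cells : List String) (fuel : Nat) (i : Int) (acc : Int × Int × Int),
      cells.length ≤ fuel →
      GoodCells col brk i cells →
      aScan col length cb brk 0 i cells acc = pvScanB col length cb fuel i cells acc := by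
  intro cells
  induction hn : cells.length using Nat.strong_induction_on generalizing cells with
  | _ n ihn =>
    intro fuel i acc hfuel hg
    cases cells with
    | nil => cases fuel <;> simp [aScan, pvScanB]
    | cons c rest =>
      have hfuel' : (c :: rest).length ≤ fuel := by rw [hn]; exact hfuel
      obtain ⟨f, rfl⟩ : ∃ f, fuel = f + 1 := by
        cases fuel
        · exact absurd hfuel' (by simp)
        · exact ⟨_, rfl⟩
      have hfr : rest.length ≤ f := by
        simpa [List.length_cons] using hfuel' 
      by_cases hc : c = col
      · -- head starts a run
        subst hc
        have hsplit : c :: rest = (c :: rest.takeWhile (fun d => d == c)) ++ rest.dropWhile (fun d => d == c) := by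
          simp [List.takeWhile_append_dropWhile]
        have hruncol : ∀ d ∈ (c :: rest.takeWhile (fun d => d == c)), d = c := by
          intro d hd
          rcases List.mem_cons.mp hd with rfl | hd'
          · rfl
          · have := List.mem_takeWhile_imp hd'
            simpa using this
        have hrest' := dropWhile_head_not c rest
        have hrun := aScan_run c length cb brk
          (c :: rest.takeWhile (fun d => d == c)) (by simp) hruncol
          (rest.dropWhile (fun d => d == c)) hrest' i 0 acc
          (by rw [← hsplit]; exact hg)
        rw [hsplit, hrun]
        -- now unfold pvScanB on the same decomposition
        rw [← hsplit]
        simp only [pvScanB]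
        rw [if_neg (by simp : ¬ (c ≠ c))]
        have hr : (1 : Int) + ((rest.takeWhile (fun d => d == c)).length : Int)
            = ((c :: rest.takeWhile (fun d => d == c)).length : Int) := by
          push_cast [List.length_cons]; ring
        -- align the two conditional bumps
        have hbump :
            (if (0 : Int) + ((c :: rest.takeWhile (fun d => d == c)).length : Int) = length then
              pvBump (cb (i + ((c :: rest.takeWhile (fun d => d == c)).length : Int)) + cb (i + ((c :: rest.takeWhile (fun d => d == c)).length : Int) - 1 - length)) acc
            else acc)
            = (if (1 : Int) + ((rest.takeWhile (fun d => d == c)).length : Int) = length then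
              pvBump (cb (i - 1) + cb (i + (1 + ((rest.takeWhile (fun d => d == c)).length : Int)))) acc
            else acc) := by
          rw [hr]
          by_cases hq : (0 : Int) + ((c :: rest.takeWhile (fun d => d == c)).length : Int) = length
          · rw [if_pos hq, if_pos (by omega)]
            have ea : i + ((c :: rest.takeWhile (fun d => d == c)).length : Int) - 1 - length = i - 1 := by omega
            rw [ea]
            rw [Int.add_comm (cb (i + ((c :: rest.takeWhile (fun d => d == c)).length : Int))) (cb (i - 1))]
          · rw [if_neg hq, if_neg (by omega)]
        rw [hbump]
        -- recurse on the remainder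
        have hgood' : GoodCells c brk (i + ((c :: rest.takeWhile (fun d => d == c)).length : Int)) (rest.dropWhile (fun d => d == c)) := by
          exact goodCells_append c brk (c :: rest.takeWhile (fun d => d == c)) (rest.dropWhile (fun d => d == c)) i (by rw [← hsplit]; exact hg)
        have hdw := List.length_dropWhile_le (fun d => d == c) rest
        have hlt : (rest.dropWhile (fun d => d == c)).length < n := by
          subst hn
          simp only [List.length_cons]
          omega
        have hrecur := ihn _ hlt (rest.dropWhile (fun d => d == c)) rfl f
          (i + ((c :: rest.takeWhile (fun d => d == c)).length : Int))
          (if (1 : Int) + ((rest.takeWhile (fun d => d == c)).length : Int) = length then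
            pvBump (cb (i - 1) + cb (i + (1 + ((rest.takeWhile (fun d => d == c)).length : Int)))) acc
          else acc) (by omega) hgood'
        rw [hrecur]
        have ei : i + ((c :: rest.takeWhile (fun d => d == c)).length : Int) = i + (1 + ((rest.takeWhile (fun d => d == c)).length : Int)) := by
          push_cast [List.length_cons]; ring
        rw [ei]
      · -- head is not col: both sides skip it
        have hnot : ¬ ((if c = col then (0 : Int) + 1 else 0) = length ∧ brk i = true) := by
          rw [if_neg hc]
          intro hx; exact hlen hx.1.symm
        rw [aScan, if_neg hnot]
        have hz : (if c = col then (0 : Int) + 1 else 0) = 0 := by simp [hc]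
        rw [hz]
        rw [pvScanB, if_pos hc]
        have hlt : rest.length < n := by subst hn; simp
        exact ihn _ hlt rest rfl f (i + 1) acc hfr (goodCells_tail col brk i c rest hg)

-- is_bounded at walk index k, expressed through Source B's closed_at
theorem isb_bump (board : List (List String)) (y_start x_start length d_y d_x : Int) (k : Int)
    (acc : Int × Int × Int) :
    (let opening := is_bounded board (y_start + k * d_y) (x_start + k * d_x) length d_y d_x
     if opening = "SEMIOPEN" then (acc.1, acc.2.1 + 1, acc.2.2)
     else if opening = "OPEN" then (acc.1 + 1, acc.2.1, acc.2.2)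
     else if opening = "CLOSED" then (acc.1, acc.2.1, acc.2.2 + 1)
     else acc)
    = pvBump (pvClosedAt board y_start x_start d_y d_x (k + 1) + pvClosedAt board y_start x_start d_y d_x (k - length)) acc := by
  have ey1 : y_start + k * d_y + d_y = y_start + (k + 1) * d_y := by ring
  have ex1 : x_start + k * d_x + d_x = x_start + (k + 1) * d_x := by ring
  have ey2 : y_start + k * d_y - d_y * (length - 1) - d_y = y_start + (k - length) * d_y := by ring
  have ex2 : x_start + k * d_x - d_x * (length - 1) - d_x = x_start + (k - length) * d_x := by ring
  simp only [is_bounded, pvClosedAt, ey1, ex1, ey2, ex2]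
  by_cases p1 : (0 ≤ y_start + (k + 1) * d_y ∧ y_start + (k + 1) * d_y < (board.length : Int) ∧ 0 ≤ x_start + (k + 1) * d_x ∧ x_start + (k + 1) * d_x < ((board.headD []).length : Int)) <;>
  by_cases p2 : (0 ≤ y_start + (k - length) * d_y ∧ y_start + (k - length) * d_y < (board.length : Int) ∧ 0 ≤ x_start + (k - length) * d_x ∧ x_start + (k - length) * d_x < ((board.headD []).length : Int)) <;>
  by_cases s1 : pvCell board (y_start + (k + 1) * d_y) (x_start + (k + 1) * d_x) = " " <;>
  by_cases s2 : pvCell board (y_start + (k - length) * d_y) (x_start + (k - length) * d_x) = " " <;>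
  simp only [List.headD_eq_head?_getD] at p1 p2 <;>
  simp [p1, p2, s1, s2, pvBump]

-- A's fuel loop equals the temp_len scan over the collected cells
theorem loopA_eq_aScan (board : List (List String)) (col : String) (y_start x_start length d_y d_x : Int) :
    ∀ (fuel : Nat) (k t : Int) (acc : Int × Int × Int),
      pvLoopA board col length d_y d_x fuel (y_start + k * d_y) (x_start + k * d_x) t acc
        = aScan col length (pvClosedAt board y_start x_start d_y d_x)
            (brkF board col y_start x_start d_y d_x) t k
            (pvWalk board d_y d_x fuel (y_start + k * d_y) (x_start + k * d_x)) acc := by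
  intro fuel
  induction fuel with
  | zero => intro k t acc; simp [pvLoopA, pvWalk, aScan]
  | succ f ih =>
    intro k t acc
    have ey : y_start + k * d_y + d_y = y_start + (k + 1) * d_y := by ring
    have ex : x_start + k * d_x + d_x = x_start + (k + 1) * d_x := by ring
    by_cases hin : (0 ≤ y_start + k * d_y ∧ y_start + k * d_y < (board.length : Int) ∧ 0 ≤ x_start + k * d_x ∧ x_start + k * d_x < ((board.headD []).length : Int))
    · rw [pvLoopA, pvWalk]
      simp only [if_pos hin]
      -- the two fire conditions agree
      have hcond : ((if pvCell board (y_start + k * d_y) (x_start + k * d_x) = col then t + 1 else 0) = length ∧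
          ((! decide (0 ≤ y_start + k * d_y + d_y ∧ y_start + k * d_y + d_y < (board.length : Int) ∧ 0 ≤ x_start + k * d_x + d_x ∧ x_start + k * d_x + d_x < ((board.headD []).length : Int))) = true ∨
           ((! decide (0 ≤ y_start + k * d_y + d_y ∧ y_start + k * d_y + d_y < (board.length : Int) ∧ 0 ≤ x_start + k * d_x + d_x ∧ x_start + k * d_x + d_x < ((board.headD []).length : Int))) = false ∧
            pvCell board (y_start + k * d_y + d_y) (x_start + k * d_x + d_x) ≠ col)))
          ↔ ((if pvCell board (y_start + k * d_y) (x_start + k * d_x) = col then t + 1 else 0) = length ∧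
             brkF board col y_start x_start d_y d_x k = true) := by
        rw [ey, ex]
        unfold brkF
        by_cases p : (0 ≤ y_start + (k + 1) * d_y ∧ y_start + (k + 1) * d_y < (board.length : Int) ∧ 0 ≤ x_start + (k + 1) * d_x ∧ x_start + (k + 1) * d_x < ((board.headD []).length : Int)) <;>
        by_cases q : pvCell board (y_start + (k + 1) * d_y) (x_start + (k + 1) * d_x) = col <;>
          simp only [List.headD_eq_head?_getD] at p <;>
          simp [p, q]
      rw [aScan]
      by_cases hfire : ((if pvCell board (y_start + k * d_y) (x_start + k * d_x) = col then t + 1 else 0) = length ∧ brkF board col y_start x_start d_y d_x k = true)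
      · rw [if_pos (hcond.mpr hfire), if_pos hfire]
        have hb := isb_bump board y_start x_start length d_y d_x k acc
        simp only at hb
        rw [hb, ey, ex]
        exact ih (k + 1) 0 _
      · rw [if_neg (fun hx => hfire (hcond.mp hx)), if_neg hfire, ey, ex]
        exact ih (k + 1) _ acc
    · rw [pvLoopA, pvWalk]
      simp only [if_neg hin]
      rfl

-- the collected cells are consistent with the break flags (walk short enough to have ended
-- by leaving the board)
theorem walk_good (board : List (List String)) (col : String) (y_start x_start d_y d_x : Int) :
    ∀ (fuel : Nat) (k : Int),
      (pvWalk board d_y d_x fuel (y_start + k * d_y) (x_start + k * d_x)).length < fuel →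
      GoodCells col (brkF board col y_start x_start d_y d_x) k
        (pvWalk board d_y d_x fuel (y_start + k * d_y) (x_start + k * d_x)) := by
  intro fuel
  induction fuel with
  | zero => intro k h; omega
  | succ f ih =>
    intro k hlt
    have ey : y_start + k * d_y + d_y = y_start + (k + 1) * d_y := by ring
    have ex : x_start + k * d_x + d_x = x_start + (k + 1) * d_x := by ring
    by_cases hin : (0 ≤ y_start + k * d_y ∧ y_start + k * d_y < (board.length : Int) ∧ 0 ≤ x_start + k * d_x ∧ x_start + k * d_x < ((board.headD []).length : Int))
    · rw [pvWalk] at hlt ⊢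
      simp only [if_pos hin] at hlt ⊢
      rw [ey, ex] at hlt ⊢
      have hlt' : (pvWalk board d_y d_x f (y_start + (k + 1) * d_y) (x_start + (k + 1) * d_x)).length < f := by
        simpa using Nat.lt_of_succ_lt_succ (by simpa [List.length_cons] using hlt)
      have hg' := ih (k + 1) hlt'
      cases hsub : pvWalk board d_y d_x f (y_start + (k + 1) * d_y) (x_start + (k + 1) * d_x) with
      | nil =>
          -- walk ended without fuel exhaustion ⇒ next position is off-board
          have hf : 0 < f := by rw [hsub] at hlt'; omega
          obtain ⟨f', rfl⟩ : ∃ f', f = f' + 1 := ⟨f - 1, by omega⟩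
          rw [pvWalk] at hsub
          by_cases hp : (0 ≤ y_start + (k + 1) * d_y ∧ y_start + (k + 1) * d_y < (board.length : Int) ∧ 0 ≤ x_start + (k + 1) * d_x ∧ x_start + (k + 1) * d_x < ((board.headD []).length : Int))
          · rw [if_pos hp] at hsub; exact absurd hsub (by simp)
          · show brkF board col y_start x_start d_y d_x k = true
            unfold brkF
            simp only [List.headD_eq_head?_getD] at hp
            simp [hp]
      | cons c' tl =>
          constructor
          · -- brk k ↔ c' ≠ col, where c' is the next on-board cell
            have hf : 0 < f := by rw [hsub] at hlt'; simp at hlt'; omega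
            obtain ⟨f', rfl⟩ : ∃ f', f = f' + 1 := ⟨f - 1, by omega⟩
            rw [pvWalk] at hsub
            by_cases hp : (0 ≤ y_start + (k + 1) * d_y ∧ y_start + (k + 1) * d_y < (board.length : Int) ∧ 0 ≤ x_start + (k + 1) * d_x ∧ x_start + (k + 1) * d_x < ((board.headD []).length : Int))
            · rw [if_pos hp] at hsub
              have hc' : c' = pvCell board (y_start + (k + 1) * d_y) (x_start + (k + 1) * d_x) := by
                have := List.head_eq_of_cons_eq hsub.symm; exact this
              unfold brkF
              simp only [List.headD_eq_head?_getD] at hp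
              simp [hp, hc']
            · rw [if_neg hp] at hsub; exact absurd hsub (by simp)
          · rw [hsub] at hg'
            exact hg'
    · rw [pvWalk]
      simp only [if_neg hin]
      trivial

-- walk-length bounds: with a nonzero step the fuel board.length + width + 1 is never exhausted
theorem walk_len_dy_pos (board : List (List String)) (d_y d_x : Int) (hd : 1 ≤ d_y) :
    ∀ (fuel : Nat) (y x : Int),
      (pvWalk board d_y d_x fuel y x).length ≤ ((board.length : Int) - y).toNat := by
  intro fuel
  induction fuel with
  | zero => intro y x; simp [pvWalk]
  | succ f ih =>
    intro y x
    by_cases hin : (0 ≤ y ∧ y < (board.length : Int) ∧ 0 ≤ x ∧ x < ((board.headD []).length : Int))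
    · rw [pvWalk]; simp only [if_pos hin, List.length_cons]
      have h1 := ih (y + d_y) (x + d_x)
      obtain ⟨a1, a2, a3, a4⟩ := hin
      omega
    · rw [pvWalk]; simp only [if_neg hin, List.length_nil]; omega

theorem walk_len_dy_neg (board : List (List String)) (d_y d_x : Int) (hd : d_y ≤ -1) :
    ∀ (fuel : Nat) (y x : Int),
      (pvWalk board d_y d_x fuel y x).length ≤ (y + 1).toNat := by
  intro fuel
  induction fuel with
  | zero => intro y x; simp [pvWalk]
  | succ f ih =>
    intro y x
    by_cases hin : (0 ≤ y ∧ y < (board.length : Int) ∧ 0 ≤ x ∧ x < ((board.headD []).length : Int))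
    · rw [pvWalk]; simp only [if_pos hin, List.length_cons]
      have h1 := ih (y + d_y) (x + d_x)
      obtain ⟨a1, a2, a3, a4⟩ := hin
      omega
    · rw [pvWalk]; simp only [if_neg hin, List.length_nil]; omega

theorem walk_len_dx_pos (board : List (List String)) (d_y d_x : Int) (hd : 1 ≤ d_x) :
    ∀ (fuel : Nat) (y x : Int),
      (pvWalk board d_y d_x fuel y x).length ≤ (((board.headD []).length : Int) - x).toNat := by
  intro fuel
  induction fuel with
  | zero => intro y x; simp [pvWalk]
  | succ f ih =>
    intro y x
    by_cases hin : (0 ≤ y ∧ y < (board.length : Int) ∧ 0 ≤ x ∧ x < ((board.headD []).length : Int))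
    · rw [pvWalk]; simp only [if_pos hin, List.length_cons]
      have h1 := ih (y + d_y) (x + d_x)
      obtain ⟨a1, a2, a3, a4⟩ := hin
      omega
    · rw [pvWalk]; simp only [if_neg hin, List.length_nil]; omega

theorem walk_len_dx_neg (board : List (List String)) (d_y d_x : Int) (hd : d_x ≤ -1) :
    ∀ (fuel : Nat) (y x : Int),
      (pvWalk board d_y d_x fuel y x).length ≤ (x + 1).toNat := by
  intro fuel
  induction fuel with
  | zero => intro y x; simp [pvWalk]
  | succ f ih =>
    intro y x
    by_cases hin : (0 ≤ y ∧ y < (board.length : Int) ∧ 0 ≤ x ∧ x < ((board.headD []).length : Int))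
    · rw [pvWalk]; simp only [if_pos hin, List.length_cons]
      have h1 := ih (y + d_y) (x + d_x)
      obtain ⟨a1, a2, a3, a4⟩ := hin
      omega
    · rw [pvWalk]; simp only [if_neg hin, List.length_nil]; omega

-- ===== lemmas for the length = 0 region (the tightness theorem and the no-fire case) =====

def sum3 (p : Int × Int × Int) : Int := p.1 + p.2.1 + p.2.2

theorem bump_sum (k : Int) (acc : Int × Int × Int) : sum3 (pvBump k acc) = sum3 acc + 1 := by
  unfold pvBump sum3
  split_ifs <;> ring

theorem aScan_sum_mono (col : String) (length : Int) (cb : Int → Int) (brk : Int → Bool) :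
    ∀ (cells : List String) (t i : Int) (acc : Int × Int × Int),
      sum3 acc ≤ sum3 (aScan col length cb brk t i cells acc) := by
  intro cells
  induction cells with
  | nil => intro t i acc; simp [aScan]
  | cons c rest ih =>
      intro t i acc
      rw [aScan]
      split_ifs <;>
        first
          | (have h1 := ih 0 (i + 1) (pvBump (cb (i + 1) + cb (i - length)) acc)
             have h2 := bump_sum (cb (i + 1) + cb (i - length)) acc
             omega)
          | exact ih _ (i + 1) acc

theorem aScan_fire (col : String) (cb : Int → Int) (brk : Int → Bool) :
    ∀ (cells : List String) (j : Nat) (v : String) (t i : Int) (acc : Int × Int × Int),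
      cells[j]? = some v → v ≠ col → brk (i + (j : Int)) = true →
      sum3 acc + 1 ≤ sum3 (aScan col 0 cb brk t i cells acc) := by
  intro cells
  induction cells with
  | nil => intro j v t i acc hget; simp at hget
  | cons c rest ih =>
      intro j v t i acc hget hv hbrk
      cases j with
      | zero =>
          have hc : c = v := by simpa using hget
          subst hc
          have hb : brk i = true := by simpa using hbrk
          rw [aScan, if_pos ⟨by simp [hv], hb⟩]
          have h1 := aScan_sum_mono col 0 cb brk rest 0 (i + 1) (pvBump (cb (i + 1) + cb (i - 0)) acc)
          have h2 := bump_sum (cb (i + 1) + cb (i - 0)) acc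
          omega
      | succ j' =>
          have hget' : rest[j']? = some v := by simpa using hget
          have hbrk' : brk (i + 1 + (j' : Int)) = true := by
            have e : i + 1 + (j' : Int) = i + ((j' + 1 : Nat) : Int) := by push_cast; ring
            rw [e]; exact hbrk
          by_cases hfire : ((if c = col then t + 1 else 0) = 0 ∧ brk i = true)
          · rw [aScan, if_pos hfire]
            have h1 := ih j' v 0 (i + 1) (pvBump (cb (i + 1) + cb (i - 0)) acc) hget' hv hbrk'
            have h2 := bump_sum (cb (i + 1) + cb (i - 0)) acc
            omega
          · rw [aScan, if_neg hfire]
            exact ih j' v _ (i + 1) acc hget' hv hbrk'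

theorem aScan_nofire (col : String) (cb : Int → Int) (brk : Int → Bool) :
    ∀ (cells : List String) (t i : Int) (acc : Int × Int × Int), 0 ≤ t →
      (∀ (j : Nat) (v : String), cells[j]? = some v → v ≠ col → brk (i + (j : Int)) = false) →
      aScan col 0 cb brk t i cells acc = acc := by
  intro cells
  induction cells with
  | nil => intro t i acc _ _; simp [aScan]
  | cons c rest ih =>
      intro t i acc ht hno
      have hshift : ∀ (j : Nat) (v : String), rest[j]? = some v → v ≠ col →
          brk (i + 1 + (j : Int)) = false := by
        intro j v hj hv
        have e : i + 1 + (j : Int) = i + ((j + 1 : Nat) : Int) := by push_cast; ring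
        rw [e]
        exact hno (j + 1) v (by simpa using hj) hv
      by_cases hc : c = col
      · have hnf : ¬ ((if c = col then t + 1 else 0) = 0 ∧ brk i = true) := by
          rw [if_pos hc]; intro hx; omega
        rw [aScan, if_neg hnf]
        rw [if_pos hc]
        exact ih (t + 1) (i + 1) acc (by omega) hshift
      · have hb : brk i = false := by
          have := hno 0 c (by simp) hc
          simpa using this
        have hnf : ¬ ((if c = col then t + 1 else 0) = 0 ∧ brk i = true) := by
          rw [hb]; intro hx; exact absurd hx.2 (by simp)
        rw [aScan, if_neg hnf, if_neg hc]
        exact ih 0 (i + 1) acc le_rfl hshift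

theorem scanB_zero (col : String) (cb : Int → Int) :
    ∀ (fuel : Nat) (i : Int) (cells : List String) (acc : Int × Int × Int),
      pvScanB col 0 cb fuel i cells acc = acc := by
  intro fuel
  induction fuel with
  | zero => intro i cells acc; simp [pvScanB]
  | succ f ih =>
      intro i cells acc
      cases cells with
      | nil => simp [pvScanB]
      | cons c rest =>
          simp only [pvScanB]
          split_ifs with h1 h2
          · exact ih (i + 1) rest acc
          · exfalso; omega
          · exact ih _ _ acc

theorem dInB_iff (board : List (List String)) (y_start x_start d_y d_x : Int) (j : Nat) :
    dInB board y_start x_start d_y d_x j ↔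
      (0 ≤ y_start + j * d_y ∧ y_start + j * d_y < (board.length : Int) ∧
       0 ≤ x_start + j * d_x ∧ x_start + j * d_x < ((board.headD []).length : Int)) := by
  unfold dInB; omega

theorem cell_eq_dCell (board : List (List String)) (y x : Int)
    (hy0 : 0 ≤ y) (hy : y.toNat < board.length) (hx0 : 0 ≤ x) :
    pvCell board y x = (board.getD y.toNat []).getD x.toNat "" := by
  simp [pvCell, PySem.List.pyGet?_of_nonneg, hy0, hx0, List.getD_eq_getElem?_getD,
    List.getElem?_eq_getElem, hy]

-- a convex segment of an arithmetic progression stays inside a box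
theorem seg_bound (a d h : Int) (j k : Nat) (hk : k ≤ j) (h0a : 0 ≤ a) (h0b : a < h)
    (hja : 0 ≤ a + j * d) (hjb : a + j * d < h) : 0 ≤ a + k * d ∧ a + k * d < h := by
  by_cases hd : 0 ≤ d
  · have h1 : (k : Int) * d ≤ (j : Int) * d :=
      mul_le_mul_of_nonneg_right (by exact_mod_cast hk) hd
    have h2 : 0 ≤ (k : Int) * d := mul_nonneg (by positivity) hd
    constructor <;> linarith
  · push_neg at hd
    have h1 : (j : Int) * d ≤ (k : Int) * d :=
      mul_le_mul_of_nonpos_right (by exact_mod_cast hk) (le_of_lt hd)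
    have h2 : (k : Int) * d ≤ 0 := by nlinarith
    constructor <;> linarith

-- a cell delivered by the walk is on the board and is pvCell of its position
theorem walk_inb (board : List (List String)) (d_y d_x : Int) :
    ∀ (fuel : Nat) (y x : Int) (j : Nat) (v : String),
      (pvWalk board d_y d_x fuel y x)[j]? = some v →
      (0 ≤ y + j * d_y ∧ y + j * d_y < (board.length : Int) ∧
       0 ≤ x + j * d_x ∧ x + j * d_x < ((board.headD []).length : Int)) ∧
      v = pvCell board (y + j * d_y) (x + j * d_x) := by
  intro fuel
  induction fuel with
  | zero => intro y x j v h; simp [pvWalk] at h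
  | succ f ih =>
      intro y x j v h
      rw [pvWalk] at h
      by_cases hin : (0 ≤ y ∧ y < (board.length : Int) ∧ 0 ≤ x ∧ x < ((board.headD []).length : Int))
      · rw [if_pos hin] at h
        cases j with
        | zero =>
            have hv : v = pvCell board y x := by simpa using h.symm
            constructor
            · push_cast
              simpa using hin
            · rw [hv]; norm_num
        | succ j' =>
            have h' : (pvWalk board d_y d_x f (y + d_y) (x + d_x))[j']? = some v := by
              simpa using h
            have := ih (y + d_y) (x + d_x) j' v h'
            have ey : y + d_y + (j' : Int) * d_y = y + ((j' + 1 : Nat) : Int) * d_y := by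
              push_cast; ring
            have ex : x + d_x + (j' : Int) * d_x = x + ((j' + 1 : Nat) : Int) * d_x := by
              push_cast; ring
            rw [ey, ex] at this
            exact this
      · rw [if_neg hin] at h
        simp at h

-- conversely, a position whose whole prefix is on the board is delivered by the walk
theorem walk_get (board : List (List String)) (d_y d_x : Int) :
    ∀ (fuel : Nat) (y x : Int) (j : Nat), j < fuel →
      (∀ k : Nat, k ≤ j →
        (0 ≤ y + k * d_y ∧ y + k * d_y < (board.length : Int) ∧
         0 ≤ x + k * d_x ∧ x + k * d_x < ((board.headD []).length : Int))) →
      (pvWalk board d_y d_x fuel y x)[j]? = some (pvCell board (y + j * d_y) (x + j * d_x)) := by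
  intro fuel
  induction fuel with
  | zero => intro y x j hj; omega
  | succ f ih =>
      intro y x j hj hall
      have h0 := hall 0 (by omega)
      have h0' : (0 ≤ y ∧ y < (board.length : Int) ∧ 0 ≤ x ∧ x < ((board.headD []).length : Int)) := by
        push_cast at h0
        simpa using h0
      rw [pvWalk, if_pos h0']
      cases j with
      | zero => simp
      | succ j' =>
          have hall' : ∀ k : Nat, k ≤ j' →
              (0 ≤ (y + d_y) + k * d_y ∧ (y + d_y) + k * d_y < (board.length : Int) ∧
               0 ≤ (x + d_x) + k * d_x ∧ (x + d_x) + k * d_x < ((board.headD []).length : Int)) := by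
            intro k hk
            have := hall (k + 1) (by omega)
            have ey : y + ((k + 1 : Nat) : Int) * d_y = (y + d_y) + (k : Int) * d_y := by
              push_cast; ring
            have ex : x + ((k + 1 : Nat) : Int) * d_x = (x + d_x) + (k : Int) * d_x := by
              push_cast; ring
            rw [ey, ex] at this
            exact this
          have := ih (y + d_y) (x + d_x) j' (by omega) hall'
          have ey : (y + d_y) + (j' : Int) * d_y = y + ((j' + 1 : Nat) : Int) * d_y := by
            push_cast; ring
          have ex : (x + d_x) + (j' : Int) * d_x = x + ((j' + 1 : Nat) : Int) * d_x := by
            push_cast; ring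
          rw [ey, ex] at this
          simpa using this

-- ===== VERDICT (by name: the statement is the Claim_ definition above) =====
theorem my_detect_row_spec : Claim_unchanged_my_detect_row := by
  intro board col y_start x_start length d_y d_x hdom hpre
  unfold Spec_my_detect_row
  intro hnD
  unfold my_detect_row my_detect_row_alt
  by_cases hin : (0 ≤ y_start ∧ y_start < (board.length : Int) ∧ 0 ≤ x_start ∧ x_start < ((board.headD []).length : Int))
  · -- start on board: Pre_ gives a nonzero step
    have hd : ¬ (d_y = 0 ∧ d_x = 0) := by
      rcases hpre.2 with h | h
      · exact absurd hin h
      · exact h.1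
    have e0y : y_start + 0 * d_y = y_start := by ring
    have e0x : x_start + 0 * d_x = x_start := by ring
    have hA := loopA_eq_aScan board col y_start x_start length d_y d_x
      (board.length + (board.headD []).length + 1) 0 0 (0, 0, 0)
    rw [e0y, e0x] at hA
    have hwlen : (pvWalk board d_y d_x (board.length + (board.headD []).length + 1) y_start x_start).length < board.length + (board.headD []).length + 1 := by
      have hd4 : 1 ≤ d_y ∨ d_y ≤ -1 ∨ 1 ≤ d_x ∨ d_x ≤ -1 := by omega
      obtain ⟨a1, a2, a3, a4⟩ := hin
      rcases hd4 with h | h | h | h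
      · have := walk_len_dy_pos board d_y d_x h (board.length + (board.headD []).length + 1) y_start x_start
        omega
      · have := walk_len_dy_neg board d_y d_x h (board.length + (board.headD []).length + 1) y_start x_start
        omega
      · have := walk_len_dx_pos board d_y d_x h (board.length + (board.headD []).length + 1) y_start x_start
        omega
      · have := walk_len_dx_neg board d_y d_x h (board.length + (board.headD []).length + 1) y_start x_start
        omega
    by_cases hl0 : length = 0
    · -- length = 0 but no quirk trigger on the line (else D_ would hold): both sides (0,0,0)
      subst hl0
      rw [hA, scanB_zero]
      apply aScan_nofire col (pvClosedAt board y_start x_start d_y d_x)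
        (brkF board col y_start x_start d_y d_x) _ 0 0 (0, 0, 0) le_rfl
      intro j v hget hv
      by_contra hbt
      have hb : brkF board col y_start x_start d_y d_x (0 + (j : Int)) = true := by
        simpa using hbt
      obtain ⟨hbnd, hveq⟩ := walk_inb board d_y d_x _ y_start x_start j v hget
      apply hnD
      refine ⟨rfl, ?_, j, ?_, (dInB_iff board y_start x_start d_y d_x j).mpr hbnd, ?_, ?_⟩
      · rw [dInB_iff]
        push_cast
        simpa using hin
      · obtain ⟨hlt, -⟩ := List.getElem?_eq_some_iff.mp hget
        exact List.mem_range.mpr (by omega)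
      · show dCell board y_start x_start d_y d_x j ≠ col
        unfold dCell
        rw [← cell_eq_dCell board _ _ hbnd.1 (by omega) hbnd.2.2.1, ← hveq]
        exact hv
      · unfold brkF at hb
        have ej : (0 + (j : Int) + 1) = ((j + 1 : Nat) : Int) := by push_cast; ring
        rw [ej, Bool.or_eq_true, Bool.not_eq_true', decide_eq_false_iff_not, decide_eq_true_eq] at hb
        by_cases hnb : (0 ≤ y_start + ((j + 1 : Nat) : Int) * d_y ∧ y_start + ((j + 1 : Nat) : Int) * d_y < (board.length : Int) ∧ 0 ≤ x_start + ((j + 1 : Nat) : Int) * d_x ∧ x_start + ((j + 1 : Nat) : Int) * d_x < ((board.headD []).length : Int))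
        · rcases hb with hoob | hok
          · exact absurd hnb hoob
          · right
            show dCell board y_start x_start d_y d_x (j + 1) ≠ col
            unfold dCell
            rw [← cell_eq_dCell board _ _ hnb.1 (by omega) hnb.2.2.1]
            exact hok
        · left
          rw [dInB_iff]
          exact hnb
    · -- length ≠ 0: the run equivalence
      have hwlen' := hwlen
      rw [← e0y, ← e0x] at hwlen'
      have hG := walk_good board col y_start x_start d_y d_x (board.length + (board.headD []).length + 1) 0 hwlen'
      rw [e0y, e0x] at hG
      have hAB := aScan_eq_scanB col length (pvClosedAt board y_start x_start d_y d_x)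
        (brkF board col y_start x_start d_y d_x) hl0
        (pvWalk board d_y d_x (board.length + (board.headD []).length + 1) y_start x_start)
        (pvWalk board d_y d_x (board.length + (board.headD []).length + 1) y_start x_start).length
        0 (0, 0, 0) le_rfl hG
      rw [hA, hAB]
  · -- start off board: both sides return (0, 0, 0) at once
    rw [pvLoopA, pvWalk]
    simp only [if_neg hin]
    simp [pvScanB]

theorem my_detect_row_tight : Claim_exact_my_detect_row := by
  intro board col y_start x_start length d_y d_x hdom hpre hD
  obtain ⟨hl0, hin0, j, hjmem, hinj, hcj, hbrkj⟩ := hD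
  subst hl0
  rw [dInB_iff] at hin0 hinj
  have hin : (0 ≤ y_start ∧ y_start < (board.length : Int) ∧ 0 ≤ x_start ∧ x_start < ((board.headD []).length : Int)) := by
    push_cast at hin0
    simpa using hin0
  have hB : my_detect_row_alt board col y_start x_start 0 d_y d_x = (0, 0, 0) :=
    scanB_zero col (pvClosedAt board y_start x_start d_y d_x)
      (pvWalk board d_y d_x (board.length + (board.headD []).length + 1) y_start x_start).length 0
      (pvWalk board d_y d_x (board.length + (board.headD []).length + 1) y_start x_start) (0, 0, 0)
  rw [hB]
  have e0y : y_start + 0 * d_y = y_start := by ring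
  have e0x : x_start + 0 * d_x = x_start := by ring
  have hA := loopA_eq_aScan board col y_start x_start 0 d_y d_x
    (board.length + (board.headD []).length + 1) 0 0 (0, 0, 0)
  rw [e0y, e0x] at hA
  unfold my_detect_row
  rw [hA]
  have hall : ∀ k : Nat, k ≤ j →
      (0 ≤ y_start + k * d_y ∧ y_start + k * d_y < (board.length : Int) ∧
       0 ≤ x_start + k * d_x ∧ x_start + k * d_x < ((board.headD []).length : Int)) := by
    intro k hk
    have hy := seg_bound y_start d_y (board.length : Int) j k hk hin.1 hin.2.1 hinj.1 hinj.2.1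
    have hx := seg_bound x_start d_x ((board.headD []).length : Int) j k hk hin.2.2.1 hin.2.2.2 hinj.2.2.1 hinj.2.2.2
    exact ⟨hy.1, hy.2, hx.1, hx.2⟩
  have hjN : j < board.length + (board.headD []).length + 1 := List.mem_range.mp hjmem
  have hget := walk_get board d_y d_x (board.length + (board.headD []).length + 1) y_start x_start j hjN hall
  have hv : pvCell board (y_start + (j : Int) * d_y) (x_start + (j : Int) * d_x) ≠ col := by
    rw [cell_eq_dCell board _ _ hinj.1 (by omega) hinj.2.2.1]
    exact hcj
  have hb : brkF board col y_start x_start d_y d_x (0 + (j : Int)) = true := by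
    unfold brkF
    have ej : (0 + (j : Int) + 1) = ((j + 1 : Nat) : Int) := by push_cast; ring
    rw [ej, Bool.or_eq_true]
    rcases hbrkj with hnb | hnc
    · rw [dInB_iff] at hnb
      left
      rw [Bool.not_eq_true', decide_eq_false_iff_not]
      exact hnb
    · by_cases hnb2 : (0 ≤ y_start + ((j + 1 : Nat) : Int) * d_y ∧ y_start + ((j + 1 : Nat) : Int) * d_y < (board.length : Int) ∧ 0 ≤ x_start + ((j + 1 : Nat) : Int) * d_x ∧ x_start + ((j + 1 : Nat) : Int) * d_x < ((board.headD []).length : Int))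
      · right
        rw [decide_eq_true_eq]
        rw [cell_eq_dCell board _ _ hnb2.1 (by omega) hnb2.2.2.1]
        exact hnc
      · left
        rw [Bool.not_eq_true', decide_eq_false_iff_not]
        exact hnb2
  intro heq
  have h1 := aScan_fire col (pvClosedAt board y_start x_start d_y d_x)
    (brkF board col y_start x_start d_y d_x)
    (pvWalk board d_y d_x (board.length + (board.headD []).length + 1) y_start x_start)
    j _ 0 0 (0, 0, 0) hget hv hb
  rw [heq] at h1
  simp [sum3] at h1

theorem my_detect_row_changed : Claim_changed_my_detect_row := by
  unfold Claim_changed_my_detect_row; decide
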